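-- pv_equiv track=rewrite | github.com/nugumanov03/pyt-2att | homeworks/hw6/d.py | compute_C
-- ===== SOURCE A (Python) =====
-- def compute_C(n, a, b):
--     if n == 1:
--         return 0
--     dp = [0] * (n + 1)
--     for i in range(2, n + 1):
--         dp[i] = float('inf')
--         for x in range(1, i + 1):
--             cost = max(a + dp[x - 1], b + dp[i - x])
--             dp[i] = min(dp[i], cost)
--     return dp[n]
-- ===== SOURCE B (Python) =====
-- def compute_C(n, a, b):
--     if n <= 1:
--         return 0
--     # dp (from index 0) is nondecreasing when max(a, b) >= 0 and nonincreasing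
--     # otherwise, so the inner minimum of max(increasing, decreasing) terms sits
--     # at the sign-crossing split, found by binary search instead of a full scan.
--     up = a >= 0 or b >= 0
--     dp = [0, 0]
--     for i in range(2, n + 1):
--         lo, hi = 1, i
--         while lo < hi:
--             mid = (lo + hi) // 2
--             if (a + dp[mid - 1] >= b + dp[i - mid]) == up:
--                 hi = mid
--             else:
--                 lo = mid + 1
--         best = max(a + dp[lo - 1], b + dp[i - lo])
--         if lo > 1:
--             other = max(a + dp[lo - 2], b + dp[i - lo + 1])
--             if other < best:
--                 best = other
--         dp.append(best)
--     return dp[n]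
-- ===== Notes on version B (the rewrite author's own statement) =====
-- stated objective: faster
-- what changed: B replaces A's full inner scan over all split points x by a binary search: dp is monotone (nondecreasing when max(a,b)>=0, nonincreasing otherwise), so a+dp[x-1] and b+dp[i-x] are monotone in opposite directions and the min of their max sits at the crossing split, found in O(log i); only the two candidates around the crossing are compared.
import Mathlib
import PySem

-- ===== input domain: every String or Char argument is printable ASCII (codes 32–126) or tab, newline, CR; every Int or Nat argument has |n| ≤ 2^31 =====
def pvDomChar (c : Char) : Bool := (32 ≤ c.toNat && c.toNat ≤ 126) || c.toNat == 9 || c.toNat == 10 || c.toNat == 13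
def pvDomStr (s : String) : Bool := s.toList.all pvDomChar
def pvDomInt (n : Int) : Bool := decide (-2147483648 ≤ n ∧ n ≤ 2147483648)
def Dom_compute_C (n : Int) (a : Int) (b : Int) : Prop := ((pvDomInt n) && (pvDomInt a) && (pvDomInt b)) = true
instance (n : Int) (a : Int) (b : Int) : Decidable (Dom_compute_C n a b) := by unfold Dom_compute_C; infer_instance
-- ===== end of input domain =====

-- B replaces A's full inner scan over split points by a binary search for the
-- crossing of the two monotone cost terms (dp is monotone), an asymptotic speedup.


-- ===== PORT A =====
-- Python's transient dp[i] = float('inf') is ported as an Option Int accumulator (none = inf);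
-- exact because min(inf, c) = c and the inner loop is nonempty for every i ≥ 2, so the final
-- value is always an int.  pyGetD/pySetD defaults are exact: every executed index is in range
-- under Pre_ (0 ≤ n).
def compute_C (n : Int) (a : Int) (b : Int) : Int :=
  if n = 1 then 0
  else
    let dp0 : List Int := List.replicate (n + 1).toNat 0
    let dp := (PySem.List.pyRange 2 (n + 1) 1).foldl (fun dp i =>
      let v : Option Int := (PySem.List.pyRange 1 (i + 1) 1).foldl (fun acc x =>
        let cost := max (a + PySem.List.pyGetD dp (x - 1) 0) (b + PySem.List.pyGetD dp (i - x) 0)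
        some (match acc with | none => cost | some c => min c cost)) none
      PySem.List.pySetD dp i (v.getD 0)) dp0
    PySem.List.pyGetD dp n 0

-- ===== PORT B =====
-- B's 'while lo < hi' binary-search loop, ported as recursion on (hi - lo).toNat.
def pvSearch (pred : Int → Bool) (lo hi : Int) : Int :=
  if h : lo < hi then
    let mid := PySem.Int.floordiv (lo + hi) 2
    if pred mid then pvSearch pred lo mid else pvSearch pred (mid + 1) hi
  else lo
termination_by (hi - lo).toNat
decreasing_by
  · have h1 := (PySem.Int.le_floordiv_iff_mul_le (a := lo + hi) (b := 2) (q := lo) (by omega)).mpr (by omega)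
    have h2 := (PySem.Int.floordiv_lt_iff_lt_mul (a := lo + hi) (b := 2) (q := hi) (by omega)).mpr (by omega)
    simp only [mid] at *
    omega
  · have h1 := (PySem.Int.le_floordiv_iff_mul_le (a := lo + hi) (b := 2) (q := lo) (by omega)).mpr (by omega)
    have h2 := (PySem.Int.floordiv_lt_iff_lt_mul (a := lo + hi) (b := 2) (q := hi) (by omega)).mpr (by omega)
    simp only [mid] at *
    omega

-- 'if other < best: best = other' kept as the conditional, the append as dp ++ [best].
def compute_C_alt (n : Int) (a : Int) (b : Int) : Int :=
  if n ≤ 1 then 0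
  else
    let up : Bool := (decide (0 ≤ a)) || (decide (0 ≤ b))
    let dp := (PySem.List.pyRange 2 (n + 1) 1).foldl (fun dp i =>
      let lo := pvSearch (fun x =>
        (decide (b + PySem.List.pyGetD dp (i - x) 0 ≤ a + PySem.List.pyGetD dp (x - 1) 0)) == up) 1 i
      let best := max (a + PySem.List.pyGetD dp (lo - 1) 0) (b + PySem.List.pyGetD dp (i - lo) 0)
      let best := if 1 < lo then
          let other := max (a + PySem.List.pyGetD dp (lo - 2) 0) (b + PySem.List.pyGetD dp (i - lo + 1) 0)
          if other < best then other else best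
        else best
      dp ++ [best]) [0, 0]
    PySem.List.pyGetD dp n 0

-- ===== PRECONDITION & SPEC =====
-- Pre_ excludes n < 0, where A raises IndexError (dp[n] on the empty list [0]*(n+1) = []).
def Pre_compute_C (n : Int) (a : Int) (b : Int) : Prop := 0 ≤ n
instance (n : Int) (a : Int) (b : Int) : Decidable (Pre_compute_C n a b) := by unfold Pre_compute_C; infer_instance
def pvWitness_compute_C : Int × Int × Int := (3, 1, 2)
def Spec_compute_C (n : Int) (a : Int) (b : Int) (out : Int) : Prop := out = compute_C_alt n a b
instance (n : Int) (a : Int) (b : Int) (out : Int) : Decidable (Spec_compute_C n a b out) := by unfold Spec_compute_C; infer_instance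

-- ===== CLAIM (what is proved, stated in full; the proofs are below) =====
def Claim_equal_compute_C : Prop := ∀ (n : Int) (a : Int) (b : Int), Dom_compute_C n a b → Pre_compute_C n a b → Spec_compute_C n a b (compute_C n a b)

-- ===== LEMMAS AND PROOFS =====

-- Reference sequence: pvQ a b k is the dp table dp[0..k+1].
def pvCand (a b : Int) (q : List Int) : List Int :=
  (q.zip q.reverse).map (fun uv => max (a + uv.1) (b + uv.2))
def pvNew (a b : Int) (q : List Int) : Int :=
  (PySem.List.min? (pvCand a b q) (fun x => x)).getD 0
def pvQ (a b : Int) : Nat → List Int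
  | 0 => [0, 0]
  | k + 1 => pvQ a b k ++ [pvNew a b (pvQ a b k)]

lemma pvQ_length (a b : Int) (k : Nat) : (pvQ a b k).length = k + 2 := by
  induction k with
  | zero => rfl
  | succ k ih => simp [pvQ, ih]

def pvIsMin (l : List Int) (v : Int) : Prop := v ∈ l ∧ ∀ y ∈ l, v ≤ y

lemma pvIsMin_unique {l : List Int} {v w : Int} (hv : pvIsMin l v) (hw : pvIsMin l w) : v = w :=
  le_antisymm (hv.2 w hw.1) (hw.2 v hv.1)

-- B's reference value is a minimum of the candidate list.
lemma pvNew_isMin (a b : Int) (q : List Int) (hq : q ≠ []) :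
    pvIsMin (pvCand a b q) (pvNew a b q) := by
  have hne : pvCand a b q ≠ [] := by
    intro h
    have := congrArg List.length h
    simp [pvCand] at this
    exact hq this
  cases h : PySem.List.min? (pvCand a b q) (fun x => x) with
  | none => exact absurd ((PySem.List.min?_eq_none_iff _ _).mp h) hne
  | some m =>
    unfold pvNew
    rw [h]
    exact ⟨PySem.List.min?_mem h, fun y hy => PySem.List.min?_isMin h y hy⟩

-- A's inner Option fold computes a minimum of the mapped candidate list.
lemma pvOptFold_isMin (g : Int → Int) (l : List Int) (hl : l ≠ []) :
    ∃ v, (l.foldl (fun acc x =>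
        some (match acc with | none => g x | some c => min c (g x))) (none : Option Int)) = some v
      ∧ pvIsMin (l.map g) v := by
  have aux : ∀ (l : List Int) (w : Int),
      ∃ v, (l.foldl (fun acc x =>
          some (match acc with | none => g x | some c => min c (g x))) (some w)) = some v
        ∧ pvIsMin (w :: l.map g) v := by
    intro l
    induction l with
    | nil => exact fun w => ⟨w, rfl, by simp [pvIsMin]⟩
    | cons x l ih =>
      intro w
      obtain ⟨v, hv, hmem, hle⟩ := ih (min w (g x))
      refine ⟨v, hv, ?_, ?_⟩
      · rcases List.mem_cons.mp hmem with h | h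
        · rcases min_choice w (g x) with hc | hc <;> simp [h, hc]
        · simp [h]
      · intro y hy
        have hvm : v ≤ min w (g x) := hle _ (List.mem_cons_self ..)
        rcases List.mem_cons.mp hy with h | hy'
        case _ =>
          exact h ▸ le_trans hvm (min_le_left _ _)
        rcases List.mem_cons.mp hy' with h | h
        · exact h ▸ le_trans hvm (min_le_right _ _)
        · exact hle y (List.mem_cons_of_mem _ h)
  match l, hl with
  | x :: xs, _ =>
    obtain ⟨v, hv, hmin⟩ := aux xs (g x)
    exact ⟨v, hv, by simpa using hmin⟩

-- A's candidate list over range(1, i+1), read through dp = q ++ pad, is pvCand a b q.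
lemma pvCandMap (a b : Int) (q pad : List Int) :
    (PySem.List.pyRange 1 ((q.length : Int) + 1) 1).map (fun x =>
        max (a + PySem.List.pyGetD (q ++ pad) (x - 1) 0)
            (b + PySem.List.pyGetD (q ++ pad) ((q.length : Int) - x) 0))
      = pvCand a b q := by
  rw [PySem.List.pyRange_one, List.map_map]
  have hM : (((q.length : Int) + 1) - 1).toNat = q.length := by omega
  apply List.ext_getElem
  · simp [pvCand]
  · intro j h1 h2
    simp only [List.length_map, List.length_range, hM] at h1
    simp only [List.getElem_map, List.getElem_range, Function.comp_apply]
    have e1 : (1 + ((j : Nat) : Int)) - 1 = ((j : Nat) : Int) := by ring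
    have e2 : ((q.length : Int)) - (1 + ((j : Nat) : Int)) = (((q.length - 1 - j : Nat)) : Int) := by
      omega
    rw [e1, e2, PySem.List.pyGetD_natCast, PySem.List.pyGetD_natCast,
        List.getD_append _ _ _ _ h1,
        List.getD_append _ _ _ _ (by omega : q.length - 1 - j < q.length)]
    simp [pvCand, List.getElem_zip, List.getElem_reverse, h1,
      List.getElem?_eq_getElem (show q.length - 1 - j < q.length by omega)]

-- One outer iteration of A.
lemma pvAStep (a b : Int) (q pad : List Int) (hq : q ≠ []) :
    (fun dp i =>
      let v : Option Int := (PySem.List.pyRange 1 (i + 1) 1).foldl (fun acc x =>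
        let cost := max (a + PySem.List.pyGetD dp (x - 1) 0) (b + PySem.List.pyGetD dp (i - x) 0)
        some (match acc with | none => cost | some c => min c cost)) none
      PySem.List.pySetD dp i (v.getD 0)) (q ++ 0 :: pad) (q.length : Int)
      = (q ++ [pvNew a b q]) ++ pad := by
  have hL : 0 < q.length := List.length_pos_iff.mpr hq
  obtain ⟨v, hv, hmin⟩ := pvOptFold_isMin
      (fun x => max (a + PySem.List.pyGetD (q ++ 0 :: pad) (x - 1) 0)
                    (b + PySem.List.pyGetD (q ++ 0 :: pad) ((q.length : Int) - x) 0))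
      (PySem.List.pyRange 1 ((q.length : Int) + 1) 1)
      (by rw [PySem.List.pyRange_one_cons (by omega)]; simp)
  rw [pvCandMap a b q (0 :: pad)] at hmin
  have hveq : v = pvNew a b q := pvIsMin_unique hmin (pvNew_isMin a b q hq)
  show PySem.List.pySetD (q ++ 0 :: pad) (q.length : Int)
      (((PySem.List.pyRange 1 ((q.length : Int) + 1) 1).foldl (fun acc x =>
        some (match acc with
          | none => max (a + PySem.List.pyGetD (q ++ 0 :: pad) (x - 1) 0)
                        (b + PySem.List.pyGetD (q ++ 0 :: pad) ((q.length : Int) - x) 0)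
          | some c => min c (max (a + PySem.List.pyGetD (q ++ 0 :: pad) (x - 1) 0)
                        (b + PySem.List.pyGetD (q ++ 0 :: pad) ((q.length : Int) - x) 0)))) none).getD 0)
    = (q ++ [pvNew a b q]) ++ pad
  rw [hv, hveq]
  rw [PySem.List.pySetD_of_nonneg _ _ (by omega)]
  simp

-- A's outer fold, from any stage.
lemma pvAFold (a b : Int) (c k : Nat) :
    (PySem.List.pyRange ((k : Int) + 2) ((k : Int) + 2 + (c : Int)) 1).foldl (fun dp i =>
      let v : Option Int := (PySem.List.pyRange 1 (i + 1) 1).foldl (fun acc x =>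
        let cost := max (a + PySem.List.pyGetD dp (x - 1) 0) (b + PySem.List.pyGetD dp (i - x) 0)
        some (match acc with | none => cost | some c => min c cost)) none
      PySem.List.pySetD dp i (v.getD 0)) (pvQ a b k ++ List.replicate c 0)
      = pvQ a b (k + c) := by
  induction c generalizing k with
  | zero =>
    rw [show ((0 : Nat) : Int) = 0 from rfl]
    rw [PySem.List.pyRange_one_eq_nil (by omega)]
    simp
  | succ c ih =>
    have hne : pvQ a b k ≠ [] := by
      have hl := pvQ_length a b k
      intro h; rw [h] at hl; simp at hl
    have hstep := pvAStep a b (pvQ a b k) (List.replicate c 0) hne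
    rw [pvQ_length] at hstep
    rw [show ((k + 2 : Nat) : Int) = (k : Int) + 2 by push_cast; ring] at hstep
    beta_reduce at hstep
    rw [PySem.List.pyRange_one_cons (by omega), List.foldl_cons,
        show List.replicate (c + 1) (0 : Int) = 0 :: List.replicate c 0 from rfl, hstep,
        show (pvQ a b k ++ [pvNew a b (pvQ a b k)]) = pvQ a b (k + 1) from rfl]
    rw [show (k : Int) + 2 + 1 = ((k + 1 : Nat) : Int) + 2 by push_cast; ring,
        show (k : Int) + 2 + ((c + 1 : Nat) : Int) = ((k + 1 : Nat) : Int) + 2 + (c : Int) by push_cast; ring,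
        ih (k + 1)]
    congr 1
    omega

-- ---------- B side ----------

-- The candidate cost of split x over table q (q = dp[0..i-1], i = q.length).
def pvU (a : Int) (q : List Int) (x : Int) : Int := a + PySem.List.pyGetD q (x - 1) 0
def pvV (b : Int) (q : List Int) (x : Int) : Int := b + PySem.List.pyGetD q ((q.length : Int) - x) 0
def pvC (a b : Int) (q : List Int) (x : Int) : Int := max (pvU a q x) (pvV b q x)

-- Monotone chains over the table.
def pvUpChain (q : List Int) : Prop := ∀ j : Nat, j + 1 < q.length → q.getD j 0 ≤ q.getD (j + 1) 0
def pvDnChain (q : List Int) : Prop := ∀ j : Nat, j + 1 < q.length → q.getD (j + 1) 0 ≤ q.getD j 0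

lemma pvUpChain_le {q : List Int} (h : pvUpChain q) :
    ∀ j k : Nat, j ≤ k → k < q.length → q.getD j 0 ≤ q.getD k 0 := by
  intro j k hjk
  induction k, hjk using Nat.le_induction with
  | base => intro _; exact le_refl _
  | succ k hk' ih => intro hlt; exact le_trans (ih (by omega)) (h k hlt)

lemma pvDnChain_le {q : List Int} (h : pvDnChain q) :
    ∀ j k : Nat, j ≤ k → k < q.length → q.getD k 0 ≤ q.getD j 0 := by
  intro j k hjk
  induction k, hjk using Nat.le_induction with
  | base => intro _; exact le_refl _
  | succ k hk' ih => intro hlt; exact le_trans (h k hlt) (ih (by omega))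

-- Binary search returns the least index satisfying a monotone predicate (or hi).
lemma pvSearch_spec (pred : Int → Bool) (A B : Int)
    (mono : ∀ x y, A ≤ x → x ≤ y → y < B → pred x = true → pred y = true) :
    ∀ (k : Nat) (lo hi : Int), (hi - lo).toNat ≤ k → A ≤ lo → lo ≤ hi → hi ≤ B →
      lo ≤ pvSearch pred lo hi ∧ pvSearch pred lo hi ≤ hi ∧
      (∀ x, lo ≤ x → x < pvSearch pred lo hi → pred x = false) ∧
      (pvSearch pred lo hi < hi → pred (pvSearch pred lo hi) = true) := by
  intro k
  induction k with
  | zero =>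
    intro lo hi hk hA hlh hB
    rw [pvSearch, dif_neg (by omega)]
    exact ⟨le_refl _, hlh, fun x h1 h2 => absurd h2 (by omega), fun h => absurd h (by omega)⟩
  | succ k ih =>
    intro lo hi hk hA hlh hB
    by_cases hlt : lo < hi
    · rw [pvSearch, dif_pos hlt]
      have hm1 : lo ≤ PySem.Int.floordiv (lo + hi) 2 :=
        (PySem.Int.le_floordiv_iff_mul_le (a := lo + hi) (b := 2) (q := lo) (by omega)).mpr (by omega)
      have hm2 : PySem.Int.floordiv (lo + hi) 2 < hi :=
        (PySem.Int.floordiv_lt_iff_lt_mul (a := lo + hi) (b := 2) (q := hi) (by omega)).mpr (by omega)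
      set mid := PySem.Int.floordiv (lo + hi) 2 with hmid
      by_cases hp : pred mid = true
      · rw [if_pos hp]
        obtain ⟨r1, r2, r3, r4⟩ := ih lo mid (by omega) hA (by omega) (by omega)
        refine ⟨r1, by omega, r3, ?_⟩
        intro _
        by_cases hrm : pvSearch pred lo mid < mid
        · exact r4 hrm
        · have heq : pvSearch pred lo mid = mid := by omega
          rw [heq]; exact hp
      · rw [if_neg hp]
        obtain ⟨r1, r2, r3, r4⟩ := ih (mid + 1) hi (by omega) (by omega) (by omega) hB
        refine ⟨by omega, r2, ?_, r4⟩
        intro x hx1 hx2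
        by_cases hxm : mid + 1 ≤ x
        · exact r3 x hxm hx2
        · by_cases hpx : pred x = true
          · exact absurd (mono x mid (le_trans hA hx1) (by omega) (by omega) hpx) hp
          · exact eq_false_of_ne_true hpx
    · rw [pvSearch, dif_neg hlt]
      exact ⟨le_refl _, hlh, fun x h1 h2 => absurd h2 (by omega), fun h => absurd h (by omega)⟩

lemma pvCand_eq_map (a b : Int) (q : List Int) :
    pvCand a b q = (PySem.List.pyRange 1 ((q.length : Int) + 1) 1).map (pvC a b q) := by
  rw [← pvCandMap a b q []]
  simp only [List.append_nil]
  rfl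

-- The minimum of the candidate list sits at the crossing point x0 (valley shape).
lemma pvValley (a b : Int) (q : List Int) (x0 : Int)
    (hq : q ≠ []) (h1 : 1 ≤ x0) (h2 : x0 ≤ (q.length : Int))
    (H1 : ∀ x, 1 ≤ x → x < x0 → pvC a b q (x0 - 1) ≤ pvC a b q x)
    (H2 : ∀ x, x0 ≤ x → x ≤ (q.length : Int) → pvC a b q x0 ≤ pvC a b q x) :
    pvIsMin (pvCand a b q)
      (if 1 < x0 then
        (if pvC a b q (x0 - 1) < pvC a b q x0 then pvC a b q (x0 - 1) else pvC a b q x0)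
       else pvC a b q x0) := by
  rw [pvCand_eq_map]
  have hmem : ∀ x : Int, 1 ≤ x → x ≤ (q.length : Int) →
      pvC a b q x ∈ (PySem.List.pyRange 1 ((q.length : Int) + 1) 1).map (pvC a b q) := by
    intro x hx1 hx2
    exact List.mem_map.mpr ⟨x, PySem.List.mem_pyRange_one.mpr ⟨hx1, by omega⟩, rfl⟩
  constructor
  · split_ifs with hgt hlt
    · exact hmem _ (by omega) (by omega)
    · exact hmem _ h1 h2
    · exact hmem _ h1 h2
  · intro y hy
    obtain ⟨x, hx, rfl⟩ := List.mem_map.mp hy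
    obtain ⟨hx1, hx2⟩ := PySem.List.mem_pyRange_one.mp hx
    by_cases hlt : x < x0
    · have hH := H1 x hx1 hlt
      split_ifs with hgt hc <;> omega
    · have hH := H2 x (by omega) (by omega)
      split_ifs with hgt hc <;> omega

-- Chain facts for the reference table.
lemma pvQ_getD_zero (a b : Int) (k : Nat) : (pvQ a b k).getD 0 0 = 0 := by
  induction k with
  | zero => rfl
  | succ k ih =>
    have hl := pvQ_length a b k
    rw [pvQ, List.getD_append _ _ _ _ (by omega)]
    exact ih

lemma pvCand_getD (a b : Int) (q : List Int) (j : Nat) (hj : j < q.length) :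
    (pvCand a b q).getD j 0 = max (a + q.getD j 0) (b + q.getD (q.length - 1 - j) 0) := by
  have hlen : (pvCand a b q).length = q.length := by simp [pvCand]
  rw [List.getD_eq_getElem _ _ (by omega), List.getD_eq_getElem _ _ hj,
      List.getD_eq_getElem _ _ (by omega : q.length - 1 - j < q.length)]
  simp [pvCand, List.getElem_zip, List.getElem_reverse]

lemma pvNew_le_getD (a b : Int) (q : List Int) (hq : q ≠ []) (j : Nat) (hj : j < q.length) :
    pvNew a b q ≤ (pvCand a b q).getD j 0 := by
  have hlen : (pvCand a b q).length = q.length := by simp [pvCand]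
  rw [List.getD_eq_getElem _ _ (by omega)]
  exact (pvNew_isMin a b q hq).2 _ (List.getElem_mem _)

lemma pvLe_pvNew (a b t : Int) (q : List Int) (hq : q ≠ [])
    (H : ∀ j : Nat, j < q.length → t ≤ (pvCand a b q).getD j 0) : t ≤ pvNew a b q := by
  have hmin := pvNew_isMin a b q hq
  obtain ⟨j, hj, hget⟩ := List.mem_iff_getElem.mp hmin.1
  have hlen : (pvCand a b q).length = q.length := by simp [pvCand]
  have hH := H j (by omega)
  rw [List.getD_eq_getElem _ _ hj] at hH
  exact hget ▸ hH

lemma pvGetD_concat_length (q : List Int) (w : Int) : (q ++ [w]).getD q.length 0 = w := by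
  rw [List.getD_eq_getElem _ _ (by simp)]
  simp

lemma pvQ_ne_nil (a b : Int) (k : Nat) : pvQ a b k ≠ [] := by
  have hl := pvQ_length a b k
  intro h; rw [h] at hl; simp at hl

lemma pvQ_bound (a b : Int) (ha : a < 0) (hb : 0 ≤ b) (k : Nat) :
    ∀ j : Nat, j < (pvQ a b k).length → (pvQ a b k).getD j 0 ≤ b := by
  induction k with
  | zero =>
    intro j hj
    simp [pvQ] at hj
    interval_cases j <;> simpa [pvQ]
  | succ k ih =>
    have hl := pvQ_length a b k
    intro j hj
    rw [pvQ] at hj ⊢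
    by_cases hjl : j < (pvQ a b k).length
    · rw [List.getD_append _ _ _ _ hjl]
      exact ih j hjl
    · have hj' : j = (pvQ a b k).length := by simp at hj; omega
      rw [hj', pvGetD_concat_length]
      have hc := pvNew_le_getD a b (pvQ a b k) (pvQ_ne_nil a b k) (k + 1) (by omega)
      rw [pvCand_getD _ _ _ _ (by omega)] at hc
      have h0 : (pvQ a b k).getD ((pvQ a b k).length - 1 - (k + 1)) 0 = 0 := by
        rw [show (pvQ a b k).length - 1 - (k + 1) = 0 by omega]
        exact pvQ_getD_zero a b k
      rw [h0] at hc
      have hlast := ih (k + 1) (by omega)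
      omega

lemma pvQ_up (a b : Int) (hab : 0 ≤ a ∨ 0 ≤ b) (k : Nat) : pvUpChain (pvQ a b k) := by
  induction k with
  | zero =>
    intro j hj
    simp [pvQ] at hj
    simp [pvQ, show j = 0 by omega]
  | succ k ih =>
    have hl := pvQ_length a b k
    intro j hj
    rw [pvQ] at hj ⊢
    simp at hj
    by_cases hjl : j + 1 < (pvQ a b k).length
    · rw [List.getD_append _ _ _ _ (by omega), List.getD_append _ _ _ _ hjl]
      exact ih j hjl
    · -- last step: q.getD (k+1) ≤ pvNew a b q
      have hj' : j = k + 1 := by omega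
      rw [hj', show k + 1 + 1 = (pvQ a b k).length by omega, pvGetD_concat_length,
          List.getD_append _ _ _ _ (by omega)]
      -- every candidate is ≥ the last table entry
      apply pvLe_pvNew a b _ _ (pvQ_ne_nil a b k)
      intro jj hjj
      rw [pvCand_getD _ _ _ _ hjj]
      by_cases hlast : jj = k + 1
      · -- candidate x = i : max (a + last, b + q[0])
        subst hlast
        rw [show (pvQ a b k).length - 1 - (k + 1) = 0 by omega, pvQ_getD_zero]
        rcases hab with h0a | h0b
        · have : (pvQ a b k).getD (k + 1) 0 ≤ a + (pvQ a b k).getD (k + 1) 0 := by omega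
          exact le_trans this (le_max_left _ _)
        · by_cases h0a : 0 ≤ a
          · have : (pvQ a b k).getD (k + 1) 0 ≤ a + (pvQ a b k).getD (k + 1) 0 := by omega
            exact le_trans this (le_max_left _ _)
          · have hbnd := pvQ_bound a b (by omega) h0b k (k + 1) (by omega)
            have : (pvQ a b k).getD (k + 1) 0 ≤ b + 0 := by omega
            exact le_trans this (le_max_right _ _)
      · -- candidate jj ≤ k : dominated by the corresponding candidate one level down
        cases k with
        | zero =>
          -- q = [0,0], last entry 0, candidate = max (a+0) (b+0) with max a b ≥ 0
          have hjj0 : jj = 0 := by omega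
          subst hjj0
          simp [pvQ]
          omega
        | succ k' =>
          have hl' := pvQ_length a b k'
          have hqe : pvQ a b (k' + 1) = pvQ a b k' ++ [pvNew a b (pvQ a b k')] := rfl
          have hjjk : jj ≤ k' + 1 := by omega
          -- last entry of q is pvNew of q'
          have hlastq : (pvQ a b (k' + 1)).getD (k' + 2) 0 = pvNew a b (pvQ a b k') := by
            rw [hqe, show k' + 2 = (pvQ a b k').length by omega, pvGetD_concat_length]
          rw [hlastq]
          have hstep := pvNew_le_getD a b (pvQ a b k') (pvQ_ne_nil a b k') jj (by omega)
          rw [pvCand_getD _ _ _ _ (by omega)] at hstep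
          -- compare entrywise
          have e1 : (pvQ a b (k' + 1)).getD jj 0 = (pvQ a b k').getD jj 0 := by
            rw [hqe, List.getD_append _ _ _ _ (by omega)]
          have e2 : (pvQ a b k').getD ((pvQ a b k').length - 1 - jj) 0
              = (pvQ a b (k' + 1)).getD (k' + 1 - jj) 0 := by
            rw [hqe, List.getD_append _ _ _ _ (by omega),
              show (pvQ a b k').length - 1 - jj = k' + 1 - jj by omega]
          have e3 : (pvQ a b (k' + 1)).getD (k' + 1 - jj) 0
              ≤ (pvQ a b (k' + 1)).getD ((pvQ a b (k' + 1)).length - 1 - jj) 0 := by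
            have hc := ih (k' + 1 - jj) (by rw [pvQ_length]; omega)
            rw [show (pvQ a b (k' + 1)).length - 1 - jj = k' + 1 - jj + 1 by rw [pvQ_length]; omega]
            exact hc
          rw [e1]
          have hb2 : b + (pvQ a b k').getD ((pvQ a b k').length - 1 - jj) 0
              ≤ b + (pvQ a b (k' + 1)).getD ((pvQ a b (k' + 1)).length - 1 - jj) 0 := by
            rw [e2]; omega
          exact le_trans hstep (max_le_max (le_refl _) hb2)

lemma pvQ_dn (a b : Int) (ha : a < 0) (hb : b < 0) (k : Nat) : pvDnChain (pvQ a b k) := by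
  induction k with
  | zero =>
    intro j hj
    simp [pvQ] at hj
    simp [pvQ, show j = 0 by omega]
  | succ k ih =>
    have hl := pvQ_length a b k
    intro j hj
    rw [pvQ] at hj ⊢
    simp at hj
    by_cases hjl : j + 1 < (pvQ a b k).length
    · rw [List.getD_append _ _ _ _ (by omega), List.getD_append _ _ _ _ (by omega : j < (pvQ a b k).length)]
      exact ih j hjl
    · -- last step: pvNew a b q ≤ q.getD (k+1)
      have hj' : j = k + 1 := by omega
      rw [hj', show k + 1 + 1 = (pvQ a b k).length by omega, pvGetD_concat_length,
          List.getD_append _ _ _ _ (by omega)]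
      cases k with
      | zero =>
        -- q = [0,0]: pvNew ≤ max a b ≤ 0
        have hc := pvNew_le_getD a b (pvQ a b 0) (pvQ_ne_nil a b 0) 0 (by omega)
        rw [pvCand_getD _ _ _ _ (by omega)] at hc
        simp [pvQ] at hc ⊢
        omega
      | succ k' =>
        have hl' := pvQ_length a b k'
        have hqe : pvQ a b (k' + 1) = pvQ a b k' ++ [pvNew a b (pvQ a b k')] := rfl
        -- last entry of q is pvNew of q', realized in pvCand q' at some index j0
        have hlastq : (pvQ a b (k' + 1)).getD (k' + 2) 0 = pvNew a b (pvQ a b k') := by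
          rw [hqe, show k' + 2 = (pvQ a b k').length by omega, pvGetD_concat_length]
        rw [hlastq]
        obtain ⟨j0, hj0, hg0⟩ := List.mem_iff_getElem.mp (pvNew_isMin a b (pvQ a b k') (pvQ_ne_nil a b k')).1
        have hlenc : (pvCand a b (pvQ a b k')).length = (pvQ a b k').length := by simp [pvCand]
        have hj0' : j0 < (pvQ a b k').length := by omega
        have hg0' : pvNew a b (pvQ a b k')
            = max (a + (pvQ a b k').getD j0 0) (b + (pvQ a b k').getD ((pvQ a b k').length - 1 - j0) 0) := by
          rw [← pvCand_getD _ _ _ _ hj0', List.getD_eq_getElem _ _ hj0, hg0]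
        -- the candidate j0+1 of q is below it
        have hstep := pvNew_le_getD a b (pvQ a b (k' + 1)) (pvQ_ne_nil a b (k' + 1)) (j0 + 1) (by omega)
        rw [pvCand_getD _ _ _ _ (by omega)] at hstep
        refine le_trans hstep ?_
        rw [hg0']
        apply max_le_max
        · -- a + q[j0+1] ≤ a + q'[j0]
          have e1 : (pvQ a b (k' + 1)).getD j0 0 = (pvQ a b k').getD j0 0 := by
            rw [hqe, List.getD_append _ _ _ _ (by omega)]
          have hc := ih j0 (by omega)
          rw [e1] at hc
          omega
        · -- b + q[len-1-(j0+1)] ≤ b + q'[len'-1-j0]  (equal entries)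
          have e2 : (pvQ a b (k' + 1)).getD ((pvQ a b (k' + 1)).length - 1 - (j0 + 1)) 0
              = (pvQ a b k').getD ((pvQ a b k').length - 1 - j0) 0 := by
            rw [hqe, show (pvQ a b k' ++ [pvNew a b (pvQ a b k')]).length - 1 - (j0 + 1)
                  = (pvQ a b k').length - 1 - j0 by simp; omega,
                List.getD_append _ _ _ _ (by omega)]
          rw [e2]

-- pyGetD over a chained table is monotone in the index.
lemma pvGetD_mono_up (q : List Int) (h : pvUpChain q) (s t : Int)
    (h0 : 0 ≤ s) (hst : s ≤ t) (ht : t < (q.length : Int)) :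
    PySem.List.pyGetD q s 0 ≤ PySem.List.pyGetD q t 0 := by
  rw [show s = ((s.toNat : Nat) : Int) by omega, show t = ((t.toNat : Nat) : Int) by omega,
      PySem.List.pyGetD_natCast, PySem.List.pyGetD_natCast]
  exact pvUpChain_le h s.toNat t.toNat (by omega) (by omega)

lemma pvGetD_mono_dn (q : List Int) (h : pvDnChain q) (s t : Int)
    (h0 : 0 ≤ s) (hst : s ≤ t) (ht : t < (q.length : Int)) :
    PySem.List.pyGetD q t 0 ≤ PySem.List.pyGetD q s 0 := by
  rw [show s = ((s.toNat : Nat) : Int) by omega, show t = ((t.toNat : Nat) : Int) by omega,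
      PySem.List.pyGetD_natCast, PySem.List.pyGetD_natCast]
  exact pvDnChain_le h s.toNat t.toNat (by omega) (by omega)

-- One outer iteration of B equals appending pvNew.
lemma pvBStep (a b : Int) (q : List Int) (h2 : 2 ≤ q.length)
    (hchain : if (decide (0 ≤ a)) || (decide (0 ≤ b)) then pvUpChain q else pvDnChain q) :
    (fun (dp : List Int) (i : Int) =>
      let lo := pvSearch (fun x =>
        (decide (b + PySem.List.pyGetD dp (i - x) 0 ≤ a + PySem.List.pyGetD dp (x - 1) 0)) ==
          ((decide (0 ≤ a)) || (decide (0 ≤ b)))) 1 i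
      let best := max (a + PySem.List.pyGetD dp (lo - 1) 0) (b + PySem.List.pyGetD dp (i - lo) 0)
      let best := if 1 < lo then
          let other := max (a + PySem.List.pyGetD dp (lo - 2) 0) (b + PySem.List.pyGetD dp (i - lo + 1) 0)
          if other < best then other else best
        else best
      dp ++ [best]) q (q.length : Int)
      = q ++ [pvNew a b q] := by
  have hq : q ≠ [] := by intro h; rw [h] at h2; simp at h2
  beta_reduce
  set i : Int := (q.length : Int) with hi
  have hi2 : 2 ≤ i := by omega
  set pred : Int → Bool := (fun x =>
    (decide (b + PySem.List.pyGetD q (i - x) 0 ≤ a + PySem.List.pyGetD q (x - 1) 0)) ==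
      ((decide (0 ≤ a)) || (decide (0 ≤ b)))) with hpred
  -- unified finish from the crossing point
  suffices key : ∀ x0 : Int, 1 ≤ x0 → x0 ≤ i →
      (∀ x, 1 ≤ x → x < x0 → pred x = false) → (x0 < i → pred x0 = true) →
      (let best := max (a + PySem.List.pyGetD q (x0 - 1) 0) (b + PySem.List.pyGetD q (i - x0) 0)
       (if 1 < x0 then
          let other := max (a + PySem.List.pyGetD q (x0 - 2) 0) (b + PySem.List.pyGetD q (i - x0 + 1) 0)
          if other < best then other else best
        else best)) = pvNew a b q by
    have mono : ∀ x y, 1 ≤ x → x ≤ y → y < i → pred x = true → pred y = true := by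
      by_cases hcase : 0 ≤ a ∨ 0 ≤ b
      · have hupT : (decide (0 ≤ a) || decide (0 ≤ b)) = true := by
          rcases hcase with h | h <;> simp [h]
        have hch : pvUpChain q := by rw [hupT] at hchain; simpa using hchain
        intro x y hx hxy hy hp
        rw [hpred] at hp ⊢
        rw [hupT] at hp ⊢
        simp only [beq_true, decide_eq_true_eq] at hp ⊢
        have hu := pvGetD_mono_up q hch (x - 1) (y - 1) (by omega) (by omega) (by omega)
        have hv := pvGetD_mono_up q hch (i - y) (i - x) (by omega) (by omega) (by omega)
        omega
      · have hupF : (decide (0 ≤ a) || decide (0 ≤ b)) = false := by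
          simp [show ¬ (0 ≤ a) by omega, show ¬ (0 ≤ b) by omega]
        have hch : pvDnChain q := by rw [hupF] at hchain; simpa using hchain
        intro x y hx hxy hy hp
        rw [hpred] at hp ⊢
        rw [hupF] at hp ⊢
        simp only [beq_false, Bool.not_eq_true', decide_eq_false_iff_not] at hp ⊢
        have hu := pvGetD_mono_dn q hch (x - 1) (y - 1) (by omega) (by omega) (by omega)
        have hv := pvGetD_mono_dn q hch (i - y) (i - x) (by omega) (by omega) (by omega)
        omega
    obtain ⟨s1, s2, s3, s4⟩ :=
      pvSearch_spec pred 1 i mono ((i - 1).toNat) 1 i (by omega) (le_refl 1) (by omega) (le_refl i)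
    have hk := key _ s1 s2 s3 s4
    exact congrArg (fun z => q ++ [z]) hk
  intro x0 h1 h2' hbelow hat
  -- the valley hypotheses, per monotone direction
  have H12 : (∀ x, 1 ≤ x → x < x0 → pvC a b q (x0 - 1) ≤ pvC a b q x) ∧
      (∀ x, x0 ≤ x → x ≤ i → pvC a b q x0 ≤ pvC a b q x) := by
    by_cases hcase : 0 ≤ a ∨ 0 ≤ b
    · have hupT : (decide (0 ≤ a) || decide (0 ≤ b)) = true := by
        rcases hcase with h | h <;> simp [h]
      have hch : pvUpChain q := by rw [hupT] at hchain; simpa using hchain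
      have hfalse : ∀ x, 1 ≤ x → x < x0 →
          a + PySem.List.pyGetD q (x - 1) 0 < b + PySem.List.pyGetD q (i - x) 0 := by
        intro x hx hlt
        have hbx := hbelow x hx hlt
        rw [hpred, hupT] at hbx
        simp only [beq_true, decide_eq_false_iff_not] at hbx
        omega
      constructor
      · intro x hx hlt
        have hCx : pvC a b q x = b + PySem.List.pyGetD q (i - x) 0 :=
          max_eq_right (le_of_lt (hfalse x hx hlt))
        have hCx0 : pvC a b q (x0 - 1) = b + PySem.List.pyGetD q (i - (x0 - 1)) 0 :=
          max_eq_right (le_of_lt (hfalse (x0 - 1) (by omega) (by omega)))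
        rw [hCx, hCx0]
        have := pvGetD_mono_up q hch (i - (x0 - 1)) (i - x) (by omega) (by omega) (by omega)
        omega
      · intro x hge hle
        by_cases hx0i : x0 < i
        · have hp := hat hx0i
          rw [hpred, hupT] at hp
          simp only [beq_true, decide_eq_true_eq] at hp
          have hCx0 : pvC a b q x0 = a + PySem.List.pyGetD q (x0 - 1) 0 := max_eq_left hp
          rw [hCx0]
          simp only [pvC, pvU, pvV]
          have := pvGetD_mono_up q hch (x0 - 1) (x - 1) (by omega) (by omega) (by omega)
          exact le_trans (by omega) (le_max_left _ _)
        · have hx : x = x0 := by omega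
          rw [hx]
    · have hupF : (decide (0 ≤ a) || decide (0 ≤ b)) = false := by
        simp [show ¬ (0 ≤ a) by omega, show ¬ (0 ≤ b) by omega]
      have hch : pvDnChain q := by rw [hupF] at hchain; simpa using hchain
      have hfalse : ∀ x, 1 ≤ x → x < x0 →
          b + PySem.List.pyGetD q (i - x) 0 ≤ a + PySem.List.pyGetD q (x - 1) 0 := by
        intro x hx hlt
        have hbx := hbelow x hx hlt
        rw [hpred, hupF] at hbx
        simpa using hbx
      constructor
      · intro x hx hlt
        have hCx : pvC a b q x = a + PySem.List.pyGetD q (x - 1) 0 :=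
          max_eq_left (hfalse x hx hlt)
        have hCx0 : pvC a b q (x0 - 1) = a + PySem.List.pyGetD q ((x0 - 1) - 1) 0 :=
          max_eq_left (hfalse (x0 - 1) (by omega) (by omega))
        rw [hCx, hCx0]
        have := pvGetD_mono_dn q hch (x - 1) ((x0 - 1) - 1) (by omega) (by omega) (by omega)
        omega
      · intro x hge hle
        by_cases hx0i : x0 < i
        · have hp := hat hx0i
          rw [hpred, hupF] at hp
          simp only [beq_false, Bool.not_eq_true', decide_eq_false_iff_not] at hp
          have hCx0 : pvC a b q x0 = b + PySem.List.pyGetD q (i - x0) 0 := by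
            simp only [pvC, pvU, pvV]
            rw [← hi]
            exact max_eq_right (by omega)
          rw [hCx0]
          simp only [pvC, pvU, pvV]
          rw [← hi]
          have := pvGetD_mono_dn q hch (i - x) (i - x0) (by omega) (by omega) (by omega)
          exact le_trans (by omega) (le_max_right _ _)
        · have hx : x = x0 := by omega
          rw [hx]
  have hval := pvValley a b q x0 hq h1 h2' H12.1 H12.2
  have heq := pvIsMin_unique hval (pvNew_isMin a b q hq)
  rw [← heq]
  simp only [pvC, pvU, pvV]
  rw [show x0 - 1 - 1 = x0 - 2 by ring, show (q.length : Int) - (x0 - 1) = (q.length : Int) - x0 + 1 by ring]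

-- B's outer fold, from any stage.
lemma pvBFold (a b : Int) (c k : Nat) :
    (PySem.List.pyRange ((k : Int) + 2) ((k : Int) + 2 + (c : Int)) 1).foldl (fun dp i =>
      let lo := pvSearch (fun x =>
        (decide (b + PySem.List.pyGetD dp (i - x) 0 ≤ a + PySem.List.pyGetD dp (x - 1) 0)) ==
          ((decide (0 ≤ a)) || (decide (0 ≤ b)))) 1 i
      let best := max (a + PySem.List.pyGetD dp (lo - 1) 0) (b + PySem.List.pyGetD dp (i - lo) 0)
      let best := if 1 < lo then
          let other := max (a + PySem.List.pyGetD dp (lo - 2) 0) (b + PySem.List.pyGetD dp (i - lo + 1) 0)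
          if other < best then other else best
        else best
      dp ++ [best]) (pvQ a b k)
      = pvQ a b (k + c) := by
  induction c generalizing k with
  | zero =>
    rw [show ((0 : Nat) : Int) = 0 from rfl]
    rw [PySem.List.pyRange_one_eq_nil (by omega)]
    simp
  | succ c ih =>
    have hchain : if (decide (0 ≤ a)) || (decide (0 ≤ b)) then pvUpChain (pvQ a b k)
        else pvDnChain (pvQ a b k) := by
      split_ifs with h
      · simp only [Bool.or_eq_true, decide_eq_true_eq] at h
        exact pvQ_up a b h k
      · simp only [Bool.or_eq_true, decide_eq_true_eq] at h
        exact pvQ_dn a b (by omega) (by omega) k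
    have hstep := pvBStep a b (pvQ a b k) (by rw [pvQ_length]; omega) hchain
    rw [pvQ_length] at hstep
    rw [show ((k + 2 : Nat) : Int) = (k : Int) + 2 by push_cast; ring] at hstep
    beta_reduce at hstep
    rw [PySem.List.pyRange_one_cons (by omega), List.foldl_cons, hstep,
        show (pvQ a b k ++ [pvNew a b (pvQ a b k)]) = pvQ a b (k + 1) from rfl]
    rw [show (k : Int) + 2 + 1 = ((k + 1 : Nat) : Int) + 2 by push_cast; ring,
        show (k : Int) + 2 + ((c + 1 : Nat) : Int) = ((k + 1 : Nat) : Int) + 2 + (c : Int) by push_cast; ring,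
        ih (k + 1)]
    congr 1
    omega

-- ===== VERDICT (by name: the statement is the Claim_ definition above) =====
theorem compute_C_spec : Claim_equal_compute_C := by
  intro n a b hdom hpre
  unfold Spec_compute_C
  unfold Pre_compute_C at hpre
  by_cases h1 : n = 1
  · subst h1; simp [compute_C, compute_C_alt]
  by_cases h0 : n = 0
  · subst h0
    simp [compute_C, compute_C_alt, PySem.List.pyGetD_zero_cons]
  -- n ≥ 2
  have hn2 : 2 ≤ n := by omega
  set M : Nat := (n - 1).toNat with hMdef
  have hqlen := pvQ_length a b M
  -- A side
  simp only [compute_C]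
  rw [if_neg h1]
  have hd : List.replicate (n + 1).toNat (0 : Int) = pvQ a b 0 ++ List.replicate M 0 := by
    rw [show (n + 1).toNat = M + 2 by omega]
    simp [pvQ, List.replicate_succ]
  have hr : PySem.List.pyRange 2 (n + 1) 1
      = PySem.List.pyRange (((0 : Nat) : Int) + 2) (((0 : Nat) : Int) + 2 + (M : Int)) 1 := by
    congr 1
    omega
  rw [hd, hr, pvAFold a b M 0]
  -- B side
  simp only [compute_C_alt]
  rw [if_neg (by omega : ¬ n ≤ 1)]
  rw [show ([0, 0] : List Int) = pvQ a b 0 from rfl]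
  rw [hr, pvBFold a b M 0]
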